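-- pv_equiv track=rewrite | github.com/snekfx/task-py | src/taskpy/modern/shared/config.py | _replace_section
-- ===== SOURCE A (Python) =====
-- FEATURES_SECTION = "features"
--
-- def _replace_section(config_text: str, section: str, rendered: str) -> str:
--     """Replace (or append) a TOML section with rendered content."""
--     lines = config_text.splitlines()
--     output: list[str] = []
--     in_section = False
--     wrote_section = False
--     section_header = f"[{section}]"
--
--     for line in lines:
--         stripped = line.strip()
--         is_section_header = stripped.startswith("[") and stripped.endswith("]")
--         if is_section_header:
--             if stripped == "[features]":
--                 # normalize legacy feature header to constant
--                 stripped = section_header if section == FEATURES_SECTION else stripped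
--             if stripped == section_header:
--                 if not wrote_section:
--                     output.append(rendered.rstrip("\n"))
--                     wrote_section = True
--                 in_section = True
--                 continue  # Skip original header and section content
--             else:
--                 if in_section:
--                     in_section = False
--         if in_section:
--             # Skip old section lines until we leave the section
--             continue
--         output.append(line)
--
--     if not wrote_section:
--         if output and output[-1].strip():
--             output.append("")
--         output.append(rendered.rstrip("\n"))
--
--     return "\n".join(output) + "\n"
-- ===== SOURCE B (Python) =====
-- FEATURES_SECTION = "features"
--
--
-- def _replace_section(config_text: str, section: str, rendered: str) -> str:
--     """Replace (or append) a TOML section with rendered content.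
--
--     Block decomposition: split the text into a preamble plus header-led blocks,
--     substitute the first matching block, drop later matches, keep the rest.
--     (A's legacy "[features]" normalization is a no-op -- it only rewrites the
--     header when section == "features", in which case it rewrites it to itself --
--     so a block matches exactly when its stripped header equals f"[{section}]".)
--     """
--     header = f"[{section}]"
--
--     def is_header(line):
--         s = line.strip()
--         return s.startswith("[") and s.endswith("]")
--
--     lines = config_text.splitlines()
--     n = len(lines)
--     i = 0
--     while i < n and not is_header(lines[i]):
--         i += 1
--     out = lines[:i]
--
--     replaced = False
--     while i < n:
--         j = i + 1
--         while j < n and not is_header(lines[j]):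
--             j += 1
--         if lines[i].strip() == header:
--             if not replaced:
--                 out.append(rendered.rstrip("\n"))
--                 replaced = True
--         else:
--             out.extend(lines[i:j])
--         i = j
--
--     if not replaced:
--         if out and out[-1].strip():
--             out.append("")
--         out.append(rendered.rstrip("\n"))
--
--     return "\n".join(out) + "\n"
-- ===== Notes on version B (the rewrite author's own statement) =====
-- stated objective: alternative
-- what changed: Replaces A's line-by-line state machine (in_section/wrote_section flags) with a block decomposition: the text is cut into a preamble plus header-led blocks via index scans, the first matching block is substituted and later matches dropped, and the no-op legacy [features] normalization is eliminated so matching is a single stripped-header comparison.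
import Mathlib
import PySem

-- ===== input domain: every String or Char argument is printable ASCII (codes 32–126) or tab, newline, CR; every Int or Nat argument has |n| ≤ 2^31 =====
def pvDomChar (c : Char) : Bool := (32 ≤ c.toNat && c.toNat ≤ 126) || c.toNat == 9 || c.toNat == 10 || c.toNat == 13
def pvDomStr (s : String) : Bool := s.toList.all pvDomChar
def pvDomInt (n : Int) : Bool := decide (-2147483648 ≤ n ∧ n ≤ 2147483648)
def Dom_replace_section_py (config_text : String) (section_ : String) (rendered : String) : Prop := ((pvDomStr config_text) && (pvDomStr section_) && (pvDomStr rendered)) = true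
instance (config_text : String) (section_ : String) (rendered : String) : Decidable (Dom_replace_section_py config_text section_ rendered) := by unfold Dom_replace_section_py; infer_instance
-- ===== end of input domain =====

-- B replaces A's line-by-line in_section/wrote_section state machine by a block decomposition
-- (preamble + header-led blocks, first match substituted, later matches dropped); alternative, not faster.
-- rendered.rstrip("\n") ported by hand (drop trailing '\n' chars): exact.

-- ===== PORT A =====
def pvRstripNl (cs : List Char) : List Char := (cs.reverse.dropWhile (· == '\n')).reverse

def pvLoopA (hdr : List Char) (rend : List Char) (sec : List Char) :
    List (List Char) → List (List Char) → Bool → Bool → List (List Char) × Bool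
  | [], output, _inSec, wrote => (output, wrote)
  | line :: rest, output, inSec, wrote =>
    let stripped := PySem.Chars.strip line
    let isHdr := PySem.Chars.startswith stripped ['['] && PySem.Chars.endswith stripped [']']
    if isHdr then
      let stripped2 := if stripped == ('[' :: "features".toList ++ [']'])
        then (if sec == "features".toList then hdr else stripped) else stripped
      if stripped2 == hdr then
        let st := if wrote then (output, wrote) else (output ++ [rend], true)
        pvLoopA hdr rend sec rest st.1 true st.2
      else
        pvLoopA hdr rend sec rest (output ++ [line]) false wrote
    else
      if inSec then pvLoopA hdr rend sec rest output inSec wrote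
      else pvLoopA hdr rend sec rest (output ++ [line]) inSec wrote

def replace_section_py (config_text : String) (section_ : String) (rendered : String) : String :=
  let lines := PySem.Chars.splitlines config_text.toList
  let hdr := '[' :: section_.toList ++ [']']
  let rend := pvRstripNl rendered.toList
  let st := pvLoopA hdr rend section_.toList lines [] false false
  let output :=
    if st.2 then st.1
    else
      (if !st.1.isEmpty && !(PySem.Chars.strip (st.1.getLastD [])).isEmpty
        then st.1 ++ [[]] else st.1) ++ [rend]
  String.ofList (PySem.Chars.join ['\n'] output ++ ['\n'])

-- ===== PORT B =====
def pvIsHdrB (line : List Char) : Bool :=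
  let s := PySem.Chars.strip line
  PySem.Chars.startswith s ['['] && PySem.Chars.endswith s [']']

def pvBlocksB : List (List Char) → List (List (List Char))
  | [] => []
  | h :: rest =>
    (h :: rest.takeWhile (fun l => !pvIsHdrB l)) :: pvBlocksB (rest.dropWhile (fun l => !pvIsHdrB l))
  termination_by ls => ls.length
  decreasing_by
    exact Nat.lt_succ_of_le (List.length_dropWhile_le _ _)

def pvEmitB (hdr : List Char) (rend : List Char)
    (acc : List (List Char) × Bool) : List (List (List Char)) → List (List Char) × Bool
  | [] => acc
  | b :: bs =>
    if PySem.Chars.strip (b.headD []) == hdr then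
      pvEmitB hdr rend (if acc.2 then acc else (acc.1 ++ [rend], true)) bs
    else
      pvEmitB hdr rend (acc.1 ++ b, acc.2) bs

def replace_section_py_alt (config_text : String) (section_ : String) (rendered : String) : String :=
  let hdr := '[' :: section_.toList ++ [']']
  let rend := pvRstripNl rendered.toList
  let lines := PySem.Chars.splitlines config_text.toList
  let pre := lines.takeWhile (fun l => !pvIsHdrB l)
  let blocks := pvBlocksB (lines.dropWhile (fun l => !pvIsHdrB l))
  let st := pvEmitB hdr rend (pre, false) blocks
  let out :=
    if st.2 then st.1
    else
      (if !st.1.isEmpty && !(PySem.Chars.strip (st.1.getLastD [])).isEmpty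
        then st.1 ++ [[]] else st.1) ++ [rend]
  String.ofList (PySem.Chars.join ['\n'] out ++ ['\n'])

-- ===== PRECONDITION & SPEC =====
def Spec_replace_section_py (config_text : String) (section_ : String) (rendered : String) (out : String) : Prop := out = replace_section_py_alt config_text section_ rendered
instance (config_text : String) (section_ : String) (rendered : String) (out : String) : Decidable (Spec_replace_section_py config_text section_ rendered out) := by unfold Spec_replace_section_py; infer_instance

-- ===== CLAIM (what is proved, stated in full; the proofs are below) =====
def Claim_equal_replace_section_py : Prop := ∀ (config_text : String) (section_ : String) (rendered : String), Dom_replace_section_py config_text section_ rendered → Spec_replace_section_py config_text section_ rendered (replace_section_py config_text section_ rendered)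

-- ===== LEMMAS AND PROOFS =====

-- In A's loop, the legacy "[features]" normalization never changes the stripped line.
theorem stripped2_eq (hdr sec stripped : List Char) (hh : hdr = '[' :: sec ++ [']']) :
    (if stripped == ('[' :: "features".toList ++ [']'])
      then (if sec == "features".toList then hdr else stripped) else stripped) = stripped := by
  simp only [beq_iff_eq]
  by_cases h1 : stripped = '[' :: "features".toList ++ [']']
  · by_cases h2 : sec = "features".toList
    · subst h2
      rw [if_pos h1, if_pos rfl, hh, h1]
    · rw [if_pos h1, if_neg h2]
  · rw [if_neg h1]

-- The head of a dropWhile result falsifies the predicate.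
theorem dropWhile_head_false {α : Type} (p : α → Bool) (l : List α) (h : α) (t : List α)
    (hd : l.dropWhile p = h :: t) : p h = false := by
  induction l with
  | nil => simp at hd
  | cons a as ih =>
    rw [List.dropWhile_cons] at hd
    by_cases hp : p a = true
    · exact ih (by simpa [hp] using hd)
    · have : a = h := by simpa [hp] using congrArg (List.headD · a) hd
      subst this
      simpa using hp

-- Body lines (non-headers) are skipped when in_section and appended otherwise.
theorem pvLoopA_body (hdr rend sec : List Char) (pre rest : List (List Char))
    (hpre : ∀ l ∈ pre, pvIsHdrB l = false) (output : List (List Char)) (inSec wrote : Bool) :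
    pvLoopA hdr rend sec (pre ++ rest) output inSec wrote =
      pvLoopA hdr rend sec rest (if inSec then output else output ++ pre) inSec wrote := by
  induction pre generalizing output with
  | nil => cases inSec <;> simp
  | cons l pre ih =>
    have hl : pvIsHdrB l = false := hpre l (List.mem_cons_self)
    have hl' : (PySem.Chars.startswith (PySem.Chars.strip l) ['['] &&
        PySem.Chars.endswith (PySem.Chars.strip l) [']']) = false := by
      unfold pvIsHdrB at hl; exact hl
    have hpre' : ∀ x ∈ pre, pvIsHdrB x = false := fun x hx => hpre x (List.mem_cons_of_mem _ hx)
    cases inSec with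
    | true =>
      simp only [List.cons_append, pvLoopA, hl', Bool.false_eq_true, if_false, if_true]
      simpa using ih hpre' output
    | false =>
      simp only [List.cons_append, pvLoopA, hl', Bool.false_eq_true, if_false]
      simpa [List.append_assoc] using ih hpre' (output ++ [l])

-- At a block boundary, A's loop computes B's block fold (in_section is irrelevant there).
theorem pvLoopA_blocks (hdr rend sec : List Char) (hh : hdr = '[' :: sec ++ [']'])
    (ls : List (List Char)) (hls : ls = [] ∨ ∃ h t, ls = h :: t ∧ pvIsHdrB h = true) :
    ∀ (output : List (List Char)) (inSec wrote : Bool),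
    pvLoopA hdr rend sec ls output inSec wrote =
      pvEmitB hdr rend (output, wrote) (pvBlocksB ls) := by
  induction hn : ls.length using Nat.strong_induction_on generalizing ls with
  | _ n ih =>
  intro output inSec wrote
  rcases hls with rfl | ⟨h, t, rfl, hhd⟩
  · simp [pvLoopA, pvBlocksB, pvEmitB]
  · have hhd' : (PySem.Chars.startswith (PySem.Chars.strip h) ['['] &&
        PySem.Chars.endswith (PySem.Chars.strip h) [']']) = true := by
      unfold pvIsHdrB at hhd; exact hhd
    have hsplit : t = t.takeWhile (fun l => !pvIsHdrB l) ++ t.dropWhile (fun l => !pvIsHdrB l) :=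
      (List.takeWhile_append_dropWhile).symm
    have htk : ∀ l ∈ t.takeWhile (fun l => !pvIsHdrB l), pvIsHdrB l = false := by
      intro l hl
      have := List.mem_takeWhile_imp hl
      simpa using this
    have hdrop : t.dropWhile (fun l => !pvIsHdrB l) = [] ∨
        ∃ h' t', t.dropWhile (fun l => !pvIsHdrB l) = h' :: t' ∧ pvIsHdrB h' = true := by
      cases hd : t.dropWhile (fun l => !pvIsHdrB l) with
      | nil => exact Or.inl rfl
      | cons h' t' =>
        refine Or.inr ⟨h', t', rfl, ?_⟩
        have := dropWhile_head_false (fun l => !pvIsHdrB l) t h' t' hd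
        simpa using this
    have hlen : (t.dropWhile (fun l => !pvIsHdrB l)).length < n := by
      subst hn
      exact Nat.lt_succ_of_le (List.length_dropWhile_le _ _)
    have IH := ih _ hlen _ hdrop rfl
    rw [pvBlocksB]
    simp only [pvLoopA, hhd', stripped2_eq hdr sec _ hh]
    by_cases hm : PySem.Chars.strip h == hdr
    · simp only [hm, if_true]
      conv_lhs => rw [hsplit]
      rw [pvLoopA_body hdr rend sec _ _ htk _ true _]
      simp only [if_true]
      rw [IH]
      rw [pvEmitB]
      simp only [List.headD_cons, hm, if_true]
    · have hm' : (PySem.Chars.strip h == hdr) = false := by simpa using hm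
      simp only [hm', Bool.false_eq_true, if_false]
      conv_lhs => rw [hsplit]
      rw [pvLoopA_body hdr rend sec _ _ htk _ false _]
      simp only [Bool.false_eq_true, if_false]
      rw [IH]
      rw [pvEmitB]
      simp only [List.headD_cons, hm', Bool.false_eq_true, if_false]
      rw [List.append_assoc]
      rfl

-- ===== VERDICT (by name: the statement is the Claim_ definition above) =====
theorem replace_section_py_spec : Claim_equal_replace_section_py := by
  intro config_text section_ rendered _
  unfold Spec_replace_section_py replace_section_py replace_section_py_alt
  simp only []
  set hdr := '[' :: section_.toList ++ [']'] with hh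
  set rend := pvRstripNl rendered.toList
  set lines := PySem.Chars.splitlines config_text.toList
  have hsplit : lines = lines.takeWhile (fun l => !pvIsHdrB l) ++
      lines.dropWhile (fun l => !pvIsHdrB l) := (List.takeWhile_append_dropWhile).symm
  have htk : ∀ l ∈ lines.takeWhile (fun l => !pvIsHdrB l), pvIsHdrB l = false := by
    intro l hl
    have := List.mem_takeWhile_imp hl
    simpa using this
  have hdrop : lines.dropWhile (fun l => !pvIsHdrB l) = [] ∨
      ∃ h' t', lines.dropWhile (fun l => !pvIsHdrB l) = h' :: t' ∧ pvIsHdrB h' = true := by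
    cases hd : lines.dropWhile (fun l => !pvIsHdrB l) with
    | nil => exact Or.inl rfl
    | cons h' t' =>
      refine Or.inr ⟨h', t', rfl, ?_⟩
      have := dropWhile_head_false (fun l => !pvIsHdrB l) lines h' t' hd
      simpa using this
  have key : pvLoopA hdr rend section_.toList lines [] false false =
      pvEmitB hdr rend (lines.takeWhile (fun l => !pvIsHdrB l), false)
        (pvBlocksB (lines.dropWhile (fun l => !pvIsHdrB l))) := by
    conv_lhs => rw [hsplit]
    rw [pvLoopA_body hdr rend section_.toList _ _ htk _ false _]
    simp only [Bool.false_eq_true, if_false, List.nil_append]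
    exact pvLoopA_blocks hdr rend section_.toList hh _ hdrop _ false false
  rw [key]
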